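-- pv_equiv track=rewrite | github.com/gianlucamazza/mcp-duckduckgo | mcp_duckduckgo/security.py | sanitize_search_query
-- ===== SOURCE A (Python) =====
-- def sanitize_search_query(query: str) -> str:
--     """Sanitize search queries to prevent injection attacks."""
--     # Remove potentially dangerous characters
--     dangerous_chars = ['<', '>', '"', "'", '&', '|', ';', '`', '$']
--     sanitized = query
--
--     for char in dangerous_chars:
--         sanitized = sanitized.replace(char, '')
--
--     # Limit length
--     if len(sanitized) > 400:
--         sanitized = sanitized[:400]
--
--     return sanitized.strip()
-- ===== SOURCE B (Python) =====
-- DANGEROUS = frozenset('<>"\'&|;`$')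
--
-- def sanitize_search_query(query: str) -> str:
--     """Sanitize search queries to prevent injection attacks."""
--     # Single pass: keep only safe characters, then truncate and strip.
--     sanitized = ''.join(c for c in query if c not in DANGEROUS)
--     if len(sanitized) > 400:
--         sanitized = sanitized[:400]
--     return sanitized.strip()
-- ===== Notes on version B (the rewrite author's own statement) =====
-- stated objective: idiomatic
-- what changed: Replaces nine sequential str.replace passes with a single filtering pass over the query using a frozenset membership test, then the identical truncate-and-strip.
import Mathlib
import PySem

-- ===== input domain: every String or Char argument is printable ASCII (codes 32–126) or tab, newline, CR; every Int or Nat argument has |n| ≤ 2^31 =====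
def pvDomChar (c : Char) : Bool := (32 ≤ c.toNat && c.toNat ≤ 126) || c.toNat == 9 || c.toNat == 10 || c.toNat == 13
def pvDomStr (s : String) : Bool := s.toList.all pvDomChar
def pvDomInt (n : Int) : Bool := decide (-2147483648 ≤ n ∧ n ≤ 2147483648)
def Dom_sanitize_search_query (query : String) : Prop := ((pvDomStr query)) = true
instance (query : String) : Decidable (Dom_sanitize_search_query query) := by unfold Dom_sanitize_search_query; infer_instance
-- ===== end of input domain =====

-- B replaces A's nine sequential str.replace passes by one filtering pass with a set
-- membership test (objective: idiomatic); same truncate-then-strip afterwards.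

-- ===== PORT A =====
def pvDangerousA : List String := ["<", ">", "\"", "'", "&", "|", ";", "`", "$"]

def sanitize_search_query (query : String) : String :=
  let sanitized := pvDangerousA.foldl (fun s c => PySem.Str.replace s c "") query
  let sanitized := if 400 < PySem.Str.len sanitized then PySem.Str.slice sanitized none (some 400) else sanitized
  PySem.Str.strip sanitized

-- ===== PORT B =====
def pvDangerousSet : List Char := ['<', '>', '"', '\'', '&', '|', ';', '`', '$']

def sanitize_search_query_alt (query : String) : String :=
  let sanitized := String.ofList (query.toList.filter (fun c => !(pvDangerousSet.contains c)))
  let sanitized := if 400 < PySem.Str.len sanitized then PySem.Str.slice sanitized none (some 400) else sanitized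
  PySem.Str.strip sanitized

-- ===== PRECONDITION & SPEC =====
def Spec_sanitize_search_query (query : String) (out : String) : Prop := out = sanitize_search_query_alt query
instance (query : String) (out : String) : Decidable (Spec_sanitize_search_query query out) := by unfold Spec_sanitize_search_query; infer_instance

-- ===== CLAIM (what is proved, stated in full; the proofs are below) =====
def Claim_equal_sanitize_search_query : Prop := ∀ (query : String), Dom_sanitize_search_query query → Spec_sanitize_search_query query (sanitize_search_query query)

-- ===== LEMMAS AND PROOFS =====

-- replace.go with a single-char pattern and empty replacement is a filter (when fuel ≥ length)
theorem pv_go_filter (c : Char) (fuel : Nat) (l acc : List Char) (h : l.length ≤ fuel) :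
    PySem.Chars.replace.go [c] [] fuel l acc = acc.reverse ++ l.filter (fun x => x != c) := by
  induction fuel generalizing l acc with
  | zero =>
    have : l = [] := List.eq_nil_of_length_eq_zero (Nat.le_zero.mp h)
    subst this; simp [PySem.Chars.replace.go]
  | succ n ih =>
    cases l with
    | nil => simp [PySem.Chars.replace.go]
    | cons x t =>
      by_cases hx : x = c
      · subst hx
        rw [PySem.Chars.replace.go]
        simp only [List.isPrefixOf, beq_self_eq_true, Bool.true_and, if_pos]
        · simp only [List.length_cons, List.length_nil, Nat.zero_add, List.drop_one,
            List.tail_cons, List.reverse_nil, List.nil_append]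
          rw [ih t acc (by simpa using Nat.le_of_succ_le_succ h)]
          simp
      · rw [PySem.Chars.replace.go]
        have : List.isPrefixOf [c] (x :: t) = false := by
          simp [List.isPrefixOf]; exact fun hh => absurd hh.symm hx
        rw [this]
        simp only [if_neg Bool.false_ne_true]
        rw [ih t (x :: acc) (by simpa using Nat.le_of_succ_le_succ h)]
        simp [hx]

-- s.replace(c, '') for a single character c is a filter
theorem pv_replace_filter (c : Char) (cs : List Char) :
    PySem.Chars.replace cs [c] [] = cs.filter (fun x => x != c) := by
  rw [PySem.Chars.replace]
  simp [pv_go_filter c cs.length cs [] (le_refl _)]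

-- the nine replaces of A equal the one filter of B, on the underlying char lists
theorem pv_fold_toList (q : String) :
    (pvDangerousA.foldl (fun s c => PySem.Str.replace s c "") q).toList
      = q.toList.filter (fun c => !(pvDangerousSet.contains c)) := by
  simp only [pvDangerousA, pvDangerousSet, List.foldl_cons, List.foldl_nil,
    PySem.Str.toList_replace]
  have e0 : ("" : String).toList = [] := rfl
  have e1 : ("<" : String).toList = ['<'] := rfl
  have e2 : (">" : String).toList = ['>'] := rfl
  have e3 : ("\"" : String).toList = ['"'] := rfl
  have e4 : ("'" : String).toList = ['\''] := rfl
  have e5 : ("&" : String).toList = ['&'] := rfl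
  have e6 : ("|" : String).toList = ['|'] := rfl
  have e7 : (";" : String).toList = [';'] := rfl
  have e8 : ("`" : String).toList = ['`'] := rfl
  have e9 : ("$" : String).toList = ['$'] := rfl
  rw [e0, e1, e2, e3, e4, e5, e6, e7, e8, e9]
  simp only [pv_replace_filter, List.filter_filter]
  apply List.filter_congr
  intro c _
  simp only [List.contains_cons, List.contains_nil, Bool.or_false, bne, Bool.not_or]
  ac_rfl

-- lift to strings
theorem pv_fold_eq (q : String) :
    pvDangerousA.foldl (fun s c => PySem.Str.replace s c "") q
      = String.ofList (q.toList.filter (fun c => !(pvDangerousSet.contains c))) := by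
  rw [← pv_fold_toList q, String.ofList_toList]

-- ===== VERDICT (by name: the statement is the Claim_ definition above) =====
theorem sanitize_search_query_spec : Claim_equal_sanitize_search_query := by
  intro query _
  unfold Spec_sanitize_search_query sanitize_search_query sanitize_search_query_alt
  rw [pv_fold_eq]
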